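-- pv_equiv track=rewrite | github.com/natemurthy/misc | toy-problems/leetcode/medium/4sum.py | four_sum1
-- ===== SOURCE A (Python) =====
-- def four_sum1(arr):
--     n = len(arr)
--     solns = []
--
--     for i in range(0, n-3):
--         for j in range(i+1, n-2):
--             for k in range(i+2,n-1):
--                 for l in range(i+3,n):
--                     if arr[i]+arr[j]+arr[k]+arr[l] == 0:
--                         solns.append([arr[i],arr[j],arr[k],arr[l]])
--     return solns
-- ===== SOURCE B (Python) =====
-- def four_sum1(arr):
--     n = len(arr)
--     solns = []
--     for i in range(0, n - 3):
--         # count of each value among candidate last indices l in [i+3, n)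
--         cnt = {}
--         for l in range(i + 3, n):
--             cnt[arr[l]] = cnt.get(arr[l], 0) + 1
--         a = arr[i]
--         for j in range(i + 1, n - 2):
--             b = arr[j]
--             for k in range(i + 2, n - 1):
--                 target = -(a + b + arr[k])
--                 m = cnt.get(target, 0)
--                 solns.extend([[a, b, arr[k], target]] * m)
--     return solns
-- ===== Notes on version B (the rewrite author's own statement) =====
-- stated objective: faster
-- what changed: Replaces A's innermost l-scan with a per-i value-to-count dictionary over the candidate last indices, emitting count-many copies of each quadruple at once.
import Mathlib
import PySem

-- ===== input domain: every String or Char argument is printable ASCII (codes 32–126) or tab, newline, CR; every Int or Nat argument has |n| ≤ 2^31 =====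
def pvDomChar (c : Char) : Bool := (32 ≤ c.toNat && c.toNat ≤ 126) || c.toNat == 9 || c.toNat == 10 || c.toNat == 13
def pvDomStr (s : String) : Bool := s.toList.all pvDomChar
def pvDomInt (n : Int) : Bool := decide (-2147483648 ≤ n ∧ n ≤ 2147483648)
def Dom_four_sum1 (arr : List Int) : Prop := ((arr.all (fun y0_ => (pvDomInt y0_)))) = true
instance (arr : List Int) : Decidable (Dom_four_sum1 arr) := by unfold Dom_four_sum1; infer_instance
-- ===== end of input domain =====

-- B replaces A's innermost l-scan by a per-i value→count dictionary over the candidate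
-- last indices, appending count-many copies at once (objective: faster, O(n^3) vs O(n^4)).

-- ===== PORT A =====
def four_sum1 (arr : List Int) : List (List Int) :=
  let n : Int := arr.length
  (PySem.List.pyRange 0 (n - 3) 1).foldl (fun solns i =>
    (PySem.List.pyRange (i + 1) (n - 2) 1).foldl (fun solns j =>
      (PySem.List.pyRange (i + 2) (n - 1) 1).foldl (fun solns k =>
        (PySem.List.pyRange (i + 3) n 1).foldl (fun solns l =>
          if PySem.List.pyGetD arr i 0 + PySem.List.pyGetD arr j 0 +
             PySem.List.pyGetD arr k 0 + PySem.List.pyGetD arr l 0 == 0 then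
            solns ++ [[PySem.List.pyGetD arr i 0, PySem.List.pyGetD arr j 0,
                       PySem.List.pyGetD arr k 0, PySem.List.pyGetD arr l 0]]
          else solns) solns) solns) solns) []

-- ===== PORT B =====
def four_sum1_alt (arr : List Int) : List (List Int) :=
  let n : Int := arr.length
  (PySem.List.pyRange 0 (n - 3) 1).foldl (fun solns i =>
    let cnt : PySem.Dict Int Int :=
      (PySem.List.pyRange (i + 3) n 1).foldl
        (fun c l => c.modify (PySem.List.pyGetD arr l 0) 0 (· + 1)) PySem.Dict.empty
    let a := PySem.List.pyGetD arr i 0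
    (PySem.List.pyRange (i + 1) (n - 2) 1).foldl (fun solns j =>
      let b := PySem.List.pyGetD arr j 0
      (PySem.List.pyRange (i + 2) (n - 1) 1).foldl (fun solns k =>
        let target := -(a + b + PySem.List.pyGetD arr k 0)
        let m := cnt.getD target 0
        solns ++ List.replicate m.toNat [a, b, PySem.List.pyGetD arr k 0, target]) solns) solns) []

-- ===== PRECONDITION & SPEC =====
def Spec_four_sum1 (arr : List Int) (out : List (List Int)) : Prop := out = four_sum1_alt arr
instance (arr : List Int) (out : List (List Int)) : Decidable (Spec_four_sum1 arr out) := by unfold Spec_four_sum1; infer_instance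

-- ===== CLAIM (what is proved, stated in full; the proofs are below) =====
def Claim_equal_four_sum1 : Prop := ∀ (arr : List Int), Dom_four_sum1 arr → Spec_four_sum1 arr (four_sum1 arr)

-- ===== LEMMAS AND PROOFS =====

-- A's innermost l-loop appends one quadruple per matching value in vs, in order.
theorem inner_loop_eq_replicate (a b c : Int) (vs : List Int) (s : List (List Int)) :
    vs.foldl (fun solns x => if a + b + c + x = 0 then solns ++ [[a, b, c, x]] else solns) s
      = s ++ List.replicate (vs.count (-(a + b + c))) [a, b, c, -(a + b + c)] := by
  induction vs generalizing s with
  | nil => simp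
  | cons x xs ih =>
    simp only [List.foldl_cons, List.count_cons]
    by_cases h : x = -(a + b + c)
    · subst h
      rw [if_pos (by omega), if_pos (beq_self_eq_true _), ih, List.replicate_succ]
      simp
    · rw [if_neg (by omega), if_neg (by simpa using h), Nat.add_zero]
      exact ih s

-- rewrite A's index loop as a loop over the fetched values
theorem fold_if_map (arr : List Int) (a b c : Int) (L : List Int) (s : List (List Int)) :
    L.foldl (fun solns l => if a + b + c + PySem.List.pyGetD arr l 0 = 0 then
        solns ++ [[a, b, c, PySem.List.pyGetD arr l 0]] else solns) s
      = (L.map (fun l => PySem.List.pyGetD arr l 0)).foldl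
          (fun solns x => if a + b + c + x = 0 then solns ++ [[a, b, c, x]] else solns) s := by
  induction L generalizing s with
  | nil => rfl
  | cons l L ih => simp only [List.foldl_cons, List.map_cons, ih]

-- rewrite B's counter-building loop as a loop over the fetched values
theorem counter_map (arr : List Int) (L : List Int) (d : PySem.Dict Int Int) :
    L.foldl (fun c l => PySem.Dict.modify c (PySem.List.pyGetD arr l 0) 0 (· + 1)) d
      = (L.map (fun l => PySem.List.pyGetD arr l 0)).foldl
          (fun c x => PySem.Dict.modify c x 0 (· + 1)) d := by
  induction L generalizing d with
  | nil => rfl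
  | cons l L ih => simp only [List.foldl_cons, List.map_cons, ih]

-- per-(i,j,k): A's l-scan equals count-many copies read off B's counter
theorem inner_eq (arr : List Int) (a b c lo hi : Int) (s : List (List Int)) :
    (PySem.List.pyRange lo hi 1).foldl (fun solns l =>
        if a + b + c + PySem.List.pyGetD arr l 0 = 0 then
          solns ++ [[a, b, c, PySem.List.pyGetD arr l 0]] else solns) s
      = s ++ List.replicate
          (((PySem.List.pyRange lo hi 1).foldl
              (fun d l => PySem.Dict.modify d (PySem.List.pyGetD arr l 0) 0 (· + 1))
              (PySem.Dict.empty : PySem.Dict Int Int)).getD (-(a + b + c)) (0 : Int)).toNat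
          [a, b, c, -(a + b + c)] := by
  rw [fold_if_map, counter_map, inner_loop_eq_replicate,
      PySem.Dict.getD_foldl_modify_add_one]
  simp

theorem four_sum1_spec : Claim_equal_four_sum1 := by
  intro arr _
  unfold Spec_four_sum1 four_sum1 four_sum1_alt
  simp only [beq_iff_eq]
  apply List.foldl_ext
  intro solns i _
  apply List.foldl_ext
  intro solns j _
  apply List.foldl_ext
  intro solns k _
  exact inner_eq arr _ _ _ _ _ solns

-- ===== VERDICT (by name: the statement is the Claim_ definition above) =====
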